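-- pv_equiv track=rewrite | github.com/jeff31415/min8_cpu | min8/asm.py | _plan_r1_r2_moves
-- ===== SOURCE A (Python) =====
-- def _plan_r1_r2_moves(src_a: int, src_b: int) -> list[tuple[int, int]]:
--     pending: dict[int, int] = {}
--     if src_a != 1:
--         pending[1] = src_a
--     if src_b != 2:
--         pending[2] = src_b
--
--     moves: list[tuple[int, int]] = []
--     while pending:
--         progress = False
--         sources_in_use = tuple(pending.values())
--         for target, source in list(pending.items()):
--             if target not in [other_source for other_target, other_source in pending.items() if other_target != target]:
--                 moves.append((target, source))
--                 pending.pop(target)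
--                 progress = True
--                 break
--
--         if progress:
--             continue
--
--         if pending == {1: 2, 2: 1}:
--             moves.extend([(0, 1), (1, 2), (2, 0)])
--             pending.clear()
--             continue
--
--         raise AssertionError(f"unexpected register shuffle for ALU pseudo-op: {pending!r}, sources={sources_in_use!r}")
--
--     return moves
-- ===== SOURCE B (Python) =====
-- def _plan_r1_r2_moves(src_a: int, src_b: int) -> list[tuple[int, int]]:
--     # Closed-form case analysis: dispatch on which registers need filling and
--     # on the dependency between them; no worklist loop.
--     need1 = src_a != 1
--     need2 = src_b != 2
--     if not need1:
--         return [(2, src_b)] if need2 else []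
--     if not need2:
--         return [(1, src_a)]
--     if src_b != 1:
--         return [(1, src_a), (2, src_b)]
--     if src_a != 2:
--         return [(2, 1), (1, src_a)]
--     return [(0, 1), (1, 2), (2, 0)]
-- ===== Notes on version B (the rewrite author's own statement) =====
-- stated objective: simpler
-- what changed: Replaced the iterative dict-worklist cycle-resolution loop (repeated scans for a target not used as a source, plus a swap special case) with a direct closed-form case analysis on the two needs and their dependency.
import Mathlib
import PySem

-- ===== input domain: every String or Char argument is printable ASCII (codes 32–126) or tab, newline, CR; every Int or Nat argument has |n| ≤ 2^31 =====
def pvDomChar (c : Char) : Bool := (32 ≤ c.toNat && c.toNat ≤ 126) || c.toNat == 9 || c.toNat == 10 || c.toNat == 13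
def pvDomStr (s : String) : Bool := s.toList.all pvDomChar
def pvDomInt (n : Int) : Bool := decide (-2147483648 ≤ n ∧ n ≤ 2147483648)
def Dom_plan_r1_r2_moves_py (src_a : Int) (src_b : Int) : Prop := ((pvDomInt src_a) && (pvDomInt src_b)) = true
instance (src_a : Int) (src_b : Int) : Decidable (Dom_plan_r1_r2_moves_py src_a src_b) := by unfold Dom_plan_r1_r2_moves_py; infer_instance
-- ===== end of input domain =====

-- B replaces A's dict-worklist cycle-resolution loop by a closed-form case analysis (objective: simpler).

-- ===== PORT A =====
-- The dict `pending` is the association list in insertion order (keys unique here).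
-- the inner `for … break`: first (target, source) whose target is not among the other entries' sources
def pvFindA : List (Int × Int) → List (Int × Int) → Option (Int × Int)
  | [], _ => none
  | (t, s) :: rest, all =>
    if ((all.filter (fun p => decide (p.1 ≠ t))).map Prod.snd).contains t then pvFindA rest all
    else some (t, s)

-- the `while pending:` loop; fuel bounds the iterations (≤ 2 entries, each step removes at least one
-- or clears, so fuel 3 is never exhausted). The Python dict comparison `pending == {1: 2, 2: 1}`
-- compares contents; here `pending`'s insertion order is always key 1 before key 2, so the list
-- equality below is exact. The exhausted-fuel / no-match branch corresponds to Python's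
-- `raise AssertionError`, which is unreachable (proved implicitly by the equivalence proof's case split).
def pvLoopA : Nat → List (Int × Int) → List (Int × Int) → List (Int × Int)
  | 0, _, moves => moves
  | fuel + 1, pending, moves =>
    match pending with
    | [] => moves
    | _ :: _ =>
      match pvFindA pending pending with
      | some (t, s) => pvLoopA fuel (pending.eraseP (fun p => p.1 == t)) (moves ++ [(t, s)])
      | none =>
        if pending = [(1, 2), (2, 1)] then moves ++ [(0, 1), (1, 2), (2, 0)] else moves

def plan_r1_r2_moves_py (src_a : Int) (src_b : Int) : List (Int × Int) :=
  let pending : List (Int × Int) :=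
    (if src_a ≠ 1 then [(1, src_a)] else []) ++ (if src_b ≠ 2 then [(2, src_b)] else [])
  pvLoopA 3 pending []

-- ===== PORT B =====
def plan_r1_r2_moves_py_alt (src_a : Int) (src_b : Int) : List (Int × Int) :=
  let need1 := src_a ≠ 1
  let need2 := src_b ≠ 2
  if ¬ need1 then (if need2 then [(2, src_b)] else [])
  else if ¬ need2 then [(1, src_a)]
  else if src_b ≠ 1 then [(1, src_a), (2, src_b)]
  else if src_a ≠ 2 then [(2, 1), (1, src_a)]
  else [(0, 1), (1, 2), (2, 0)]

-- ===== PRECONDITION & SPEC =====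
def Spec_plan_r1_r2_moves_py (src_a : Int) (src_b : Int) (out : List (Int × Int)) : Prop := out = plan_r1_r2_moves_py_alt src_a src_b
instance (src_a : Int) (src_b : Int) (out : List (Int × Int)) : Decidable (Spec_plan_r1_r2_moves_py src_a src_b out) := by unfold Spec_plan_r1_r2_moves_py; infer_instance

-- ===== CLAIM (what is proved, stated in full; the proofs are below) =====
def Claim_equal_plan_r1_r2_moves_py : Prop := ∀ (src_a : Int) (src_b : Int), Dom_plan_r1_r2_moves_py src_a src_b → Spec_plan_r1_r2_moves_py src_a src_b (plan_r1_r2_moves_py src_a src_b)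

-- ===== LEMMAS AND PROOFS =====

-- loop evaluations at the (at most four) pending shapes A can build
theorem pvLoop_one1 (s : Int) : pvLoopA 3 [(1, s)] [] = [(1, s)] := rfl

theorem pvLoop_one2 (s : Int) : pvLoopA 3 [(2, s)] [] = [(2, s)] := rfl

theorem pvLoop_two (a b : Int) (hb : ¬(1 : Int) = b) :
    pvLoopA 3 [(1, a), (2, b)] [] = [(1, a), (2, b)] := by
  simp [pvLoopA, pvFindA, List.eraseP, hb]

theorem pvLoop_blocked (a : Int) (ha : ¬(2 : Int) = a) :
    pvLoopA 3 [(1, a), (2, 1)] [] = [(2, 1), (1, a)] := by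
  simp [pvLoopA, pvFindA, List.eraseP, ha]

theorem pvLoop_swap : pvLoopA 3 [(1, 2), (2, 1)] [] = [(0, 1), (1, 2), (2, 0)] := by decide

-- ===== VERDICT (by name: the statement is the Claim_ definition above) =====
theorem plan_r1_r2_moves_py_spec : Claim_equal_plan_r1_r2_moves_py := by
  intro a b _
  unfold Spec_plan_r1_r2_moves_py plan_r1_r2_moves_py plan_r1_r2_moves_py_alt
  by_cases ha1 : a = 1
  · subst ha1
    by_cases hb2 : b = 2
    · subst hb2; decide
    · simp [hb2, pvLoop_one2]
  · by_cases hb2 : b = 2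
    · subst hb2
      simp [ha1, pvLoop_one1]
    · by_cases hb1 : b = 1
      · subst hb1
        by_cases ha2 : a = 2
        · subst ha2; simp [pvLoop_swap]
        · have ha2' : ¬(2 : Int) = a := fun h => ha2 h.symm
          simp [ha1, ha2, pvLoop_blocked a ha2']
      · have hb1' : ¬(1 : Int) = b := fun h => hb1 h.symm
        simp [ha1, hb2, hb1, pvLoop_two a b hb1']
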